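-- pv_equiv track=rewrite | github.com/kiseliu/must | simulator_gpt_act/model.py | parse_act
-- ===== SOURCE A (Python) =====
-- usr_acts = ["[inform_type]", "[inform_type_change]", "[ask_info]",
--             "[make_reservation]", "[make_reservation_change_time]", "[anything_else]", "[goodbye]"]
--
-- usr_slots = ['name', 'area', 'pricerange', 'food', 'people', 'day', 'time', 'address', 'postcode', 'phone', 'reference']
--
-- def parse_act(act):
--     acts = {}
--
--     items = act.split()
--     if len(items) == 1:
--         acts[items[0]] = []
--         return acts
--
--     intent = ''
--     for i, item in enumerate(items):
--         if item in usr_acts: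
--             intent = item[1:-1]
--             if intent not in acts:
--                 acts[intent] = []
--
--         if intent and item in usr_slots:
--             acts[intent].append(item)
--     return acts
-- ===== SOURCE B (Python) =====
-- usr_acts = ["[inform_type]", "[inform_type_change]", "[ask_info]",
--             "[make_reservation]", "[make_reservation_change_time]", "[anything_else]", "[goodbye]"]
--
-- usr_slots = ['name', 'area', 'pricerange', 'food', 'people', 'day', 'time', 'address', 'postcode', 'phone', 'reference']
--
-- def parse_act(act):
--     items = act.split()
--     if len(items) == 1:
--         return {items[0]: []}
--     acts = {}
--     rest = items
--     while rest:
--         tok, rest = rest[0], rest[1:]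
--         if tok in usr_acts:
--             k = 0
--             while k < len(rest) and rest[k] not in usr_acts:
--                 k += 1
--             seg, rest = rest[:k], rest[k:]
--             acts.setdefault(tok[1:-1], []).extend(t for t in seg if t in usr_slots)
--     return acts
-- ===== Notes on version B (the rewrite author's own statement) =====
-- stated objective: alternative
-- what changed: B splits the token list into act-marker segments and merges each segment's filtered slots into the dict in one setdefault/extend step, instead of A's single enumerate pass that carries a current-intent state and appends slot tokens one at a time.
import Mathlib
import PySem

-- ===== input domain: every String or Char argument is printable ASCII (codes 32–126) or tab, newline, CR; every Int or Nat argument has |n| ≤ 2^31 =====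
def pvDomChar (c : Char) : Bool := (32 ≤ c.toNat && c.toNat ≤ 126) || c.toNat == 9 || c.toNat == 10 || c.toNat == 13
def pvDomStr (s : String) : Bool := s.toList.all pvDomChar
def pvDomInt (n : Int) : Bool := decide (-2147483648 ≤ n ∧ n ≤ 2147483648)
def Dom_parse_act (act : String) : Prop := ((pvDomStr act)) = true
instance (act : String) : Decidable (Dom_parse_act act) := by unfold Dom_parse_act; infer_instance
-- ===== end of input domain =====

-- B re-parses by splitting the token list into act-marker segments and merging each segment's
-- slots at once, instead of A's per-token scan carrying a current-intent state (objective: alternative).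

-- shared module-level constants of both Pythons
def usrActs : List String := ["[inform_type]", "[inform_type_change]", "[ask_info]",
  "[make_reservation]", "[make_reservation_change_time]", "[anything_else]", "[goodbye]"]

def usrSlots : List String := ["name", "area", "pricerange", "food", "people", "day", "time",
  "address", "postcode", "phone", "reference"]

-- item[1:-1]
def stripAct (item : String) : String := PySem.Str.slice item (some 1) (some (-1))

-- ===== PORT A =====
-- one iteration of A's `for i, item in enumerate(items)` loop; state = (acts, intent)
def stepA (st : PySem.Dict String (List String) × String) (p : Int × String) :
    PySem.Dict String (List String) × String :=
  let item := p.2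
  let st1 :=
    if usrActs.contains item then
      let intent := stripAct item
      ((if st.1.contains intent then st.1 else st.1.insert intent []), intent)
    else st
  -- `acts[intent].append(item)`: whenever this branch runs, intent is a present key (A's
  -- marker branch inserted it), so the modify is exactly Python's append to the stored list
  if !(st1.2 == "") && usrSlots.contains item then
    (st1.1.modify st1.2 [] (fun l => l ++ [item]), st1.2)
  else st1

def parse_act (act : String) : List (String × List String) :=
  let items := PySem.Str.split₀ act
  if items.length == 1 then
    -- acts[items[0]] = []  (items[0] safe: length is 1, so headD's default is never used)
    ((PySem.Dict.empty : PySem.Dict String (List String)).insert (items.headD "") []).items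
  else
    ((PySem.List.enumerate items 0).foldl stepA (PySem.Dict.empty, "")).1.items

-- ===== PORT B =====
-- B's while loop: pop a token; at an act marker take the whole segment up to the next marker
-- and merge its slots via setdefault(intent, []).extend(...) (= modify intent [] (· ++ slots))
def goB (acts : PySem.Dict String (List String)) : List String → PySem.Dict String (List String)
  | [] => acts
  | t :: rest =>
    if usrActs.contains t then
      let seg := rest.takeWhile (fun s => !usrActs.contains s)
      let rest' := rest.dropWhile (fun s => !usrActs.contains s)
      goB (acts.modify (stripAct t) [] (fun l => l ++ seg.filter (fun s => usrSlots.contains s))) rest'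
    else goB acts rest
termination_by items => items.length
decreasing_by
  · exact Nat.lt_succ_of_le (List.length_dropWhile_le _ _)
  · exact Nat.lt_succ_self _

def parse_act_alt (act : String) : List (String × List String) :=
  let items := PySem.Str.split₀ act
  if items.length == 1 then [(items.headD "", [])]
  else (goB PySem.Dict.empty items).items

-- ===== PRECONDITION & SPEC =====
def Spec_parse_act (act : String) (out : List (String × List String)) : Prop := out = parse_act_alt act
instance (act : String) (out : List (String × List String)) : Decidable (Spec_parse_act act out) := by unfold Spec_parse_act; infer_instance

-- ===== CLAIM (what is proved, stated in full; the proofs are below) =====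
def Claim_equal_parse_act : Prop := ∀ (act : String), Dom_parse_act act → Spec_parse_act act (parse_act act)

-- ===== LEMMAS AND PROOFS =====

-- no act marker is a slot name
theorem acts_not_slots {t : String} (h : t ∈ usrActs) : t ∉ usrSlots := by
  simp only [usrActs] at h
  fin_cases h <;> decide

-- every stripped act marker is a nonempty string
theorem stripAct_ne_empty {t : String} (h : t ∈ usrActs) : ¬ stripAct t = "" := by
  simp only [usrActs] at h
  fin_cases h <;> decide

-- A's loop ignores the enumerate index
theorem foldl_enumerate_stepA (items : List String) :
    ∀ (n : Int) st, (PySem.List.enumerate items n).foldl stepA st =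
      items.foldl (fun st item => stepA st (0, item)) st := by
  induction items with
  | nil => intro n st; rfl
  | cons t rest ih =>
    intro n st
    simp only [PySem.List.enumerate_cons, List.foldl_cons]
    exact ih (n + 1) _

theorem modify_eq_insert (d : PySem.Dict String (List String)) (k : String)
    (f : List String → List String) : d.modify k [] f = d.insert k (f (d.getD k [])) := rfl

-- re-inserting the stored value changes nothing
theorem insert_getD_self (d : PySem.Dict String (List String)) (k : String)
    (hc : d.contains k = true) (hnd : d.keys.Nodup) : d.insert k (d.getD k []) = d := by
  apply PySem.Dict.ext
  rw [PySem.Dict.items_insert_of_contains d _ hc]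
  have h : ∀ p ∈ d.items, (if (p.1 == k) = true then (k, d.getD k []) else p) = p := by
    intro p hp
    by_cases hk : p.1 = k
    · have hm : (k, p.2) ∈ d.items := by rwa [← hk]
      rw [PySem.Dict.getD_of_mem_items d hm hnd]
      simp [hk, Prod.ext_iff]
    · simp [hk]
  rw [List.map_congr_left h]
  simp

theorem modify_nil_self (d : PySem.Dict String (List String)) (k : String)
    (hc : d.contains k = true) (hnd : d.keys.Nodup) :
    d.modify k [] (fun l => l ++ []) = d := by
  rw [modify_eq_insert]
  simpa using insert_getD_self d k hc hnd

theorem modify_modify (d : PySem.Dict String (List String)) (k : String)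
    (xs ys : List String) :
    (d.modify k [] (fun l => l ++ xs)).modify k [] (fun l => l ++ ys) =
      d.modify k [] (fun l => l ++ (xs ++ ys)) := by
  simp only [modify_eq_insert, PySem.Dict.getD_insert_self, PySem.Dict.insert_insert_self,
    List.append_assoc]

-- merging the new intent's empty-list initialisation into the first modify
theorem init_modify (d : PySem.Dict String (List String)) (k : String) (xs : List String) :
    (if d.contains k then d else d.insert k []).modify k [] (fun l => l ++ xs) =
      d.modify k [] (fun l => l ++ xs) := by
  cases hc : d.contains k with
  | true => simp
  | false =>
    simp only [Bool.false_eq_true, if_false, modify_eq_insert, PySem.Dict.getD_insert_self,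
      PySem.Dict.insert_insert_self, List.nil_append, PySem.Dict.getD_of_not_contains d _ hc]

theorem contains_modify_self (d : PySem.Dict String (List String)) (k : String)
    (f : List String → List String) : (d.modify k [] f).contains k = true := by
  rw [modify_eq_insert]; exact PySem.Dict.contains_insert_self _ _ _

theorem nodup_modify (d : PySem.Dict String (List String)) (k : String)
    (f : List String → List String) (hnd : d.keys.Nodup) : (d.modify k [] f).keys.Nodup := by
  rw [modify_eq_insert]; exact PySem.Dict.nodup_keys_insert _ _ _ hnd

theorem init_contains (d : PySem.Dict String (List String)) (k : String) :
    (if d.contains k then d else d.insert k []).contains k = true := by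
  cases hc : d.contains k with
  | true => simp [hc]
  | false => simpa using PySem.Dict.contains_insert_self d k []

theorem init_nodup (d : PySem.Dict String (List String)) (k : String) (hnd : d.keys.Nodup) :
    (if d.contains k then d else d.insert k []).keys.Nodup := by
  cases hc : d.contains k with
  | true => simpa using hnd
  | false => simpa using PySem.Dict.nodup_keys_insert d k [] hnd

-- the three shapes of one iteration of A's loop
theorem stepA_marker (acts : PySem.Dict String (List String)) (intent t : String)
    (ht : t ∈ usrActs) :
    stepA (acts, intent) (0, t) =
      ((if acts.contains (stripAct t) then acts else acts.insert (stripAct t) []), stripAct t) := by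
  simp [stepA, ht, acts_not_slots ht]

theorem stepA_slot (acts : PySem.Dict String (List String)) (intent t : String)
    (ht : t ∉ usrActs) (hs : t ∈ usrSlots) (hne : ¬ intent = "") :
    stepA (acts, intent) (0, t) = (acts.modify intent [] (fun l => l ++ [t]), intent) := by
  simp [stepA, ht, hs, hne]

theorem stepA_skip (acts : PySem.Dict String (List String)) (intent t : String)
    (ht : t ∉ usrActs) (hs : t ∉ usrSlots) :
    stepA (acts, intent) (0, t) = (acts, intent) := by
  simp [stepA, ht, hs]

-- within a segment: A's per-token fold with a live intent equals B's one-shot segment merge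
theorem lem_seg (items : List String) :
    ∀ (acts : PySem.Dict String (List String)) (intent : String),
      ¬ intent = "" → acts.contains intent = true → acts.keys.Nodup →
      (items.foldl (fun st item => stepA st (0, item)) (acts, intent)).1 =
        goB (acts.modify intent []
              (fun l => l ++ (items.takeWhile (fun s => !usrActs.contains s)).filter
                  (fun s => usrSlots.contains s)))
            (items.dropWhile (fun s => !usrActs.contains s)) := by
  induction items with
  | nil =>
    intro acts intent hne hc hnd
    simp only [List.foldl_nil, List.takeWhile_nil, List.dropWhile_nil, List.filter_nil, goB]
    exact (modify_nil_self acts intent hc hnd).symm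
  | cons t rest ih =>
    intro acts intent hne hc hnd
    by_cases hct : t ∈ usrActs
    · -- next marker: the current segment ends here
      have ht : usrActs.contains t = true := by simpa using hct
      simp only [List.takeWhile_cons, List.dropWhile_cons, ht, Bool.not_true,
        Bool.false_eq_true, if_false, List.filter_nil]
      rw [modify_nil_self acts intent hc hnd]
      simp only [List.foldl_cons, stepA_marker acts intent t hct]
      rw [ih _ _ (stripAct_ne_empty hct) (init_contains acts (stripAct t))
        (init_nodup acts (stripAct t) hnd)]
      rw [init_modify]
      simp [goB, hct]
    · have ht : usrActs.contains t = false := by simpa using hct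
      by_cases hcs : t ∈ usrSlots
      · -- slot token inside the segment
        have hs : usrSlots.contains t = true := by simpa using hcs
        simp only [List.foldl_cons, stepA_slot acts intent t hct hcs hne]
        rw [ih _ _ hne (contains_modify_self _ _ _) (nodup_modify _ _ _ hnd)]
        rw [modify_modify]
        simp [hct, hcs]
      · -- irrelevant token inside the segment
        have hs : usrSlots.contains t = false := by simpa using hcs
        simp only [List.foldl_cons, stepA_skip acts intent t hct hcs]
        rw [ih _ _ hne hc hnd]
        simp [hct, hcs]

-- before the first marker: A's fold with empty intent equals B's skip loop
theorem lem_top (items : List String) :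
    ∀ (acts : PySem.Dict String (List String)), acts.keys.Nodup →
      (items.foldl (fun st item => stepA st (0, item)) (acts, "")).1 = goB acts items := by
  induction items with
  | nil => intro acts _; simp [goB]
  | cons t rest ih =>
    intro acts hnd
    by_cases hct : t ∈ usrActs
    · have ht : usrActs.contains t = true := by simpa using hct
      simp only [List.foldl_cons, stepA_marker acts "" t hct]
      rw [lem_seg _ _ _ (stripAct_ne_empty hct) (init_contains acts (stripAct t))
        (init_nodup acts (stripAct t) hnd)]
      rw [init_modify]
      simp [goB, hct]
    · have ht : usrActs.contains t = false := by simpa using hct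
      have hstep : stepA (acts, "") (0, t) = (acts, "") := by
        simp [stepA, hct]
      simp only [List.foldl_cons, hstep]
      rw [ih acts hnd]
      simp [goB, hct]

-- ===== VERDICT (by name: the statement is the Claim_ definition above) =====
theorem parse_act_spec : Claim_equal_parse_act := by
  intro act _
  unfold Spec_parse_act parse_act parse_act_alt
  cases h1 : ((PySem.Str.split₀ act).length == 1) with
  | true =>
    simp only [h1, if_true]
    rw [PySem.Dict.items_insert_of_not_contains _ _ (by simp)]
    rfl
  | false =>
    simp only [h1, Bool.false_eq_true, if_false]
    rw [foldl_enumerate_stepA, lem_top _ _ (by simp [PySem.Dict.keys_empty])]
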